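-- pv_equiv track=rewrite | github.com/webersab/relationExtractionPipeline | de_pipeline/nel.py | disambiguated_entities_to_sent_number
-- ===== SOURCE A (Python) =====
-- def disambiguated_entities_to_sent_number(disambig, char_map):
--     """
--     Map each disambiguated entity to its sentence
--     """
--     d = {}
--     for ent in disambig:
--         sent = char_map[ent["start"]]
--         if sent in d:
--             d[sent].append(ent)
--         else:
--             d[sent] = [ent]
--     return d
-- ===== SOURCE B (Python) =====
-- def disambiguated_entities_to_sent_number(disambig, char_map):
--     """
--     Map each disambiguated entity to its sentence
--     """
--     key = lambda ent: char_map[ent["start"]]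
--     sents = list(dict.fromkeys(key(ent) for ent in disambig))
--     return {s: [ent for ent in disambig if key(ent) == s] for s in sents}
-- ===== Notes on version B (the rewrite author's own statement) =====
-- stated objective: alternative
-- what changed: Replaces the single hash-accumulation pass (membership test then append-or-insert per entity) by a two-phase scheme: first dedup the sentence keys in order of first appearance, then build each group with a per-key filter comprehension over the whole list.
import Mathlib
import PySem

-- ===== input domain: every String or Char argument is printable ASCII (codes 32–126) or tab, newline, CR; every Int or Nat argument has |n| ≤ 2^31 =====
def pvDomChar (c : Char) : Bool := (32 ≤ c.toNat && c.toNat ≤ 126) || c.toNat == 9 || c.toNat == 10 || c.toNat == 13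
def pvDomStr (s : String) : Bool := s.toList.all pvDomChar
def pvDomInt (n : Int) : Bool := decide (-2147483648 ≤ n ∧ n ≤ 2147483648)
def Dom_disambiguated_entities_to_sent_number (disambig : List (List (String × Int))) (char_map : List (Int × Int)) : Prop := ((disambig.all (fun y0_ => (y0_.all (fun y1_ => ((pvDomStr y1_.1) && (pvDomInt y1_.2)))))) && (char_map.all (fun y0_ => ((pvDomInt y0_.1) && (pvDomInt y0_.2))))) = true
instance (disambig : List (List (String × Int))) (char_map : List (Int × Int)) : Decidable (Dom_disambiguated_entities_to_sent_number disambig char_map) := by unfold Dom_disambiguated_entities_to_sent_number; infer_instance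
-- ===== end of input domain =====

-- B replaces A's single hash-accumulation pass by dedup-keys-then-filter-per-key (alternative decomposition, same result incl. key order).


-- ===== PORT A =====
-- sent = char_map[ent["start"]] : both dict lookups; none = KeyError (excluded by Pre_; the fold then leaves d unchanged)
def pvKey (char_map : List (Int × Int)) (ent : List (String × Int)) : Option Int :=
  ((PySem.Dict.mk ent).get? "start").bind (fun s => (PySem.Dict.mk char_map).get? s)

def disambiguated_entities_to_sent_number (disambig : List (List (String × Int))) (char_map : List (Int × Int)) : List (Int × List (List (String × Int))) :=
  (disambig.foldl (fun d ent =>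
      match pvKey char_map ent with
      | none => d            -- Python raises KeyError here; outside Pre_
      | some sent =>
          if d.contains sent then d.modify sent [] (fun l => l ++ [ent])  -- d[sent].append(ent)
          else d.insert sent [ent])
    PySem.Dict.empty).items

-- ===== PORT B =====
def disambiguated_entities_to_sent_number_alt (disambig : List (List (String × Int))) (char_map : List (Int × Int)) : List (Int × List (List (String × Int))) :=
  let sents := PySem.List.dedup (disambig.filterMap (pvKey char_map))   -- list(dict.fromkeys(key(ent) for ent in disambig))
  sents.map (fun s => (s, disambig.filter (fun ent => pvKey char_map ent == some s)))

-- ===== PRECONDITION & SPEC =====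
-- Pre_ excludes exactly the inputs where Python A raises KeyError: some entity lacks "start" or its start offset is not a char_map key.
def Pre_disambiguated_entities_to_sent_number (disambig : List (List (String × Int))) (char_map : List (Int × Int)) : Prop :=
  ∀ ent ∈ disambig, (pvKey char_map ent).isSome
instance (disambig : List (List (String × Int))) (char_map : List (Int × Int)) : Decidable (Pre_disambiguated_entities_to_sent_number disambig char_map) := by unfold Pre_disambiguated_entities_to_sent_number; infer_instance
def pvWitness_disambiguated_entities_to_sent_number : (List (List (String × Int))) × (List (Int × Int)) :=
  ([[("start", 0), ("end", 2)], [("start", 3)], [("start", 1)]], [(0, 0), (1, 0), (3, 1)])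
def Spec_disambiguated_entities_to_sent_number (disambig : List (List (String × Int))) (char_map : List (Int × Int)) (out : List (Int × List (List (String × Int)))) : Prop := out = disambiguated_entities_to_sent_number_alt disambig char_map
instance (disambig : List (List (String × Int))) (char_map : List (Int × Int)) (out : List (Int × List (List (String × Int)))) : Decidable (Spec_disambiguated_entities_to_sent_number disambig char_map out) := by unfold Spec_disambiguated_entities_to_sent_number; infer_instance

-- ===== CLAIM (what is proved, stated in full; the proofs are below) =====
def Claim_equal_disambiguated_entities_to_sent_number : Prop := ∀ (disambig : List (List (String × Int))) (char_map : List (Int × Int)), Dom_disambiguated_entities_to_sent_number disambig char_map → Pre_disambiguated_entities_to_sent_number disambig char_map → Spec_disambiguated_entities_to_sent_number disambig char_map (disambiguated_entities_to_sent_number disambig char_map)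

-- ===== LEMMAS AND PROOFS =====

-- A's branch (append-if-present / insert-if-new) is exactly Dict.modify with default []
lemma pv_body_eq (d : PySem.Dict Int (List (List (String × Int)))) (sent : Int) (ent : List (String × Int)) :
    (if d.contains sent then d.modify sent [] (fun l => l ++ [ent]) else d.insert sent [ent])
      = d.modify sent [] (fun l => l ++ [ent]) := by
  split_ifs with h
  · rfl
  · simp [PySem.Dict.modify, PySem.Dict.getD_of_not_contains d [] (by simpa using h)]

-- the keyed pairs list A effectively folds over
def pvPairs (char_map : List (Int × Int)) (disambig : List (List (String × Int))) : List (Int × List (String × Int)) :=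
  disambig.filterMap (fun e => (pvKey char_map e).map (fun k => (k, e)))

lemma pv_fold_eq (char_map : List (Int × Int)) (disambig : List (List (String × Int)))
    (d : PySem.Dict Int (List (List (String × Int)))) :
    disambig.foldl (fun d ent =>
      match pvKey char_map ent with
      | none => d
      | some sent =>
          if d.contains sent then d.modify sent [] (fun l => l ++ [ent])
          else d.insert sent [ent]) d
    = (pvPairs char_map disambig).foldl (fun d p => d.modify p.1 [] (fun l => l ++ [p.2])) d := by
  induction disambig generalizing d with
  | nil => rfl
  | cons e rest ih =>
      simp only [List.foldl_cons, pvPairs, List.filterMap_cons]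
      cases h : pvKey char_map e with
      | none => simpa [pvPairs] using ih d
      | some s => simpa [pvPairs, pv_body_eq] using ih _

lemma pv_pairs_fst (char_map : List (Int × Int)) (disambig : List (List (String × Int))) :
    (pvPairs char_map disambig).map Prod.fst = disambig.filterMap (pvKey char_map) := by
  induction disambig with
  | nil => rfl
  | cons e rest ih =>
      simp only [pvPairs, List.filterMap_cons] at *
      cases h : pvKey char_map e <;> simp [ih]

lemma pv_pairs_filter (char_map : List (Int × Int)) (disambig : List (List (String × Int))) (k : Int) :
    (((pvPairs char_map disambig).filter (fun p => p.1 == k)).map (fun p => p.2))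
      = disambig.filter (fun ent => pvKey char_map ent == some k) := by
  induction disambig with
  | nil => rfl
  | cons e rest ih =>
      simp only [pvPairs, List.filterMap_cons, List.filter_cons] at *
      cases h : pvKey char_map e with
      | none => simpa [h] using ih
      | some s =>
          by_cases hs : s = k
        <;> simp [hs, ih]

-- ===== VERDICT (by name: the statement is the Claim_ definition above) =====
theorem disambiguated_entities_to_sent_number_spec : Claim_equal_disambiguated_entities_to_sent_number := by
  intro disambig char_map _ _
  show disambiguated_entities_to_sent_number disambig char_map = _
  unfold disambiguated_entities_to_sent_number disambiguated_entities_to_sent_number_alt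
  rw [pv_fold_eq]
  have hnd : ((pvPairs char_map disambig).foldl (fun d p => d.modify p.1 [] (fun l => l ++ [p.2])) PySem.Dict.empty).keys.Nodup := by
    exact PySem.Dict.nodup_keys_foldl_modify_key _ Prod.fst [] (fun _ p l => l ++ [p.2]) _ (by simp)
  rw [PySem.Dict.items_eq_map_keys _ hnd []]
  have hkeys : ((pvPairs char_map disambig).foldl (fun d p => d.modify p.1 [] (fun l => l ++ [p.2])) PySem.Dict.empty).keys
      = PySem.Set.ofList (disambig.filterMap (pvKey char_map)) := by
    rw [PySem.Dict.keys_foldl_modify_key _ Prod.fst [] (fun _ p l => l ++ [p.2])]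
    rw [pv_pairs_fst]
    rfl
  rw [hkeys, PySem.List.dedup_eq_ofList]
  refine List.map_congr_left (fun k _ => ?_)
  rw [PySem.Dict.getD_foldl_modify_append, PySem.Dict.getD_empty, List.nil_append, pv_pairs_filter]
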